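-- pv_equiv track=rewrite | github.com/HMS97/NGP | VideoSpeakerDialization.py | _find_best_speaker_to_face_mapping
-- ===== SOURCE A (Python) =====
-- def _find_best_speaker_to_face_mapping(face_data):
--     face_speaker_mapping = {}
--     face_data_copy = {k: v[:] for k, v in face_data.items()}
--
--     while face_data_copy:
--         # Find the face with the biggest count time for each speaker
--         max_face_count = -1
--         max_face = None
--         max_speaker = None
--
--         for face, speaker_list in face_data_copy.items():
--             if speaker_list:
--                 speaker, count = speaker_list[0]
--                 if count > max_face_count:
--                     max_face_count = count
--                     max_face = face
--                     max_speaker = speaker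
--
--         # If no face with the biggest count time is found, break the loop
--         if max_face is None:
--             break
--
--         # Link the face to the speaker and remove the speaker from all other face items
--         face_speaker_mapping[max_face] = max_speaker
--
--         for face, speaker_list in face_data_copy.items():
--             face_data_copy[face] = [(speaker, count) for (speaker, count) in speaker_list if speaker != max_speaker]
--
--         # Remove the face from the face_data_copy
--         del face_data_copy[max_face]
--
--     return face_speaker_mapping
-- ===== SOURCE B (Python) =====
-- def _find_best_speaker_to_face_mapping(face_data):
--     # Suffix pointers + assigned-speaker set instead of rebuilding filtered
--     # lists each round: each entry is skipped at most once per face.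
--     mapping = {}
--     assigned = set()
--     ptr = {face: 0 for face in face_data}
--     while ptr:
--         best_face = None
--         best_speaker = None
--         best_count = -1
--         for face in ptr:
--             lst = face_data[face]
--             i = ptr[face]
--             while i < len(lst) and lst[i][0] in assigned:
--                 i += 1
--             ptr[face] = i
--             if i < len(lst) and lst[i][1] > best_count:
--                 best_count = lst[i][1]
--                 best_face = face
--                 best_speaker = lst[i][0]
--         if best_face is None:
--             break
--         mapping[best_face] = best_speaker
--         assigned.add(best_speaker)
--         del ptr[best_face]
--     return mapping
-- ===== Notes on version B (the rewrite author's own statement) =====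
-- stated objective: faster
-- what changed: Instead of rebuilding every face's speaker list each round to drop the assigned speaker, B keeps a per-face suffix pointer into the original lists and a set of assigned speakers, advancing each pointer past assigned speakers lazily.
import Mathlib
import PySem

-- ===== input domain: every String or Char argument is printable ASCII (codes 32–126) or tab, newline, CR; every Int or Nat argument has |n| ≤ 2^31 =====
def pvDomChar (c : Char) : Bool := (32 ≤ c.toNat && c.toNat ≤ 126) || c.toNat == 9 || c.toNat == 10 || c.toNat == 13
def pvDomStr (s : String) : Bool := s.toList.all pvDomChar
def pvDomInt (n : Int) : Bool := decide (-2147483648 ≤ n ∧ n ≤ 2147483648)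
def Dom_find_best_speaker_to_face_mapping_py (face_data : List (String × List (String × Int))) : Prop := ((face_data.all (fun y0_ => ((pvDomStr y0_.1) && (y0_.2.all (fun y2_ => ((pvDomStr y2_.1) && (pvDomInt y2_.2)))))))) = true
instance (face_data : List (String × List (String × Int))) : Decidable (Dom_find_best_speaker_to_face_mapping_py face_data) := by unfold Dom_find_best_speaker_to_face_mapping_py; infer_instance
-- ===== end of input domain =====

-- B replaces A's per-round rebuilding of every face's filtered speaker list by
-- per-face suffix pointers plus an assigned-speaker set (objective: faster, measured).

-- ===== PORT A =====
-- inner `for face, speaker_list in face_data_copy.items(): if speaker_list: …`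
def aFindMax : List (String × List (String × Int)) → Int → Option (String × String) → Option (String × String)
  | [], _, best => best
  | (face, sl) :: rest, bestc, best =>
    match sl with
    | (s, c) :: _ => if c > bestc then aFindMax rest c (some (face, s)) else aFindMax rest bestc best
    | [] => aFindMax rest bestc best

-- `while face_data_copy:` — each iteration deletes one key, so `fuel = length` never runs out early
def aLoop : Nat → List (String × List (String × Int)) → List (String × String) → List (String × String)
  | 0, _, mapping => mapping
  | fuel + 1, copy, mapping =>
    if copy.isEmpty then mapping else
    match aFindMax copy (-1) none with
    | none => mapping
    | some (face, spk) =>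
      aLoop fuel (((copy.map (fun p => (p.1, p.2.filter (fun q => q.1 ≠ spk)))).filter (fun p => p.1 ≠ face)))
        (mapping ++ [(face, spk)])

def find_best_speaker_to_face_mapping_py (face_data : List (String × List (String × Int))) : List (String × String) :=
  aLoop face_data.length (face_data.map (fun p => (p.1, p.2))) []

-- ===== PORT B =====
-- `while i < len(lst) and lst[i][0] in assigned: i += 1` (pointer as suffix)
def bAdvance (assigned : PySem.Set String) : List (String × Int) → List (String × Int)
  | [] => []
  | (s, c) :: rest => if PySem.Set.contains assigned s then bAdvance assigned rest else (s, c) :: rest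

-- one `for face in ptr:` pass: advance every pointer, track the running best
def bScan (assigned : PySem.Set String) : List (String × List (String × Int)) → Int → Option (String × String) →
    List (String × List (String × Int)) × Option (String × String)
  | [], _, best => ([], best)
  | (face, lst) :: rest, bestc, best =>
    let lst' := bAdvance assigned lst
    match lst' with
    | (s, c) :: _ =>
      if c > bestc then
        let r := bScan assigned rest c (some (face, s))
        ((face, lst') :: r.1, r.2)
      else
        let r := bScan assigned rest bestc best
        ((face, lst') :: r.1, r.2)
    | [] =>
      let r := bScan assigned rest bestc best
      ((face, lst') :: r.1, r.2)

def bLoop : Nat → PySem.Set String → List (String × List (String × Int)) → List (String × String) → List (String × String)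
  | 0, _, _, mapping => mapping
  | fuel + 1, assigned, ptrs, mapping =>
    if ptrs.isEmpty then mapping else
    let r := bScan assigned ptrs (-1) none
    match r.2 with
    | none => mapping
    | some (face, spk) =>
      bLoop fuel (PySem.Set.add assigned spk) (r.1.filter (fun p => p.1 ≠ face)) (mapping ++ [(face, spk)])

def find_best_speaker_to_face_mapping_py_alt (face_data : List (String × List (String × Int))) : List (String × String) :=
  bLoop face_data.length PySem.Set.empty (face_data.map (fun p => (p.1, p.2))) []

-- ===== PRECONDITION & SPEC =====
def Spec_find_best_speaker_to_face_mapping_py (face_data : List (String × List (String × Int))) (out : List (String × String)) : Prop := out = find_best_speaker_to_face_mapping_py_alt face_data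
instance (face_data : List (String × List (String × Int))) (out : List (String × String)) : Decidable (Spec_find_best_speaker_to_face_mapping_py face_data out) := by unfold Spec_find_best_speaker_to_face_mapping_py; infer_instance

-- ===== CLAIM (what is proved, stated in full; the proofs are below) =====
def Claim_equal_find_best_speaker_to_face_mapping_py : Prop := ∀ (face_data : List (String × List (String × Int))), Dom_find_best_speaker_to_face_mapping_py face_data → Spec_find_best_speaker_to_face_mapping_py face_data (find_best_speaker_to_face_mapping_py face_data)

-- ===== LEMMAS AND PROOFS =====

-- A's state is B's state, pointwise filtered by the assigned set
def mapF (assigned : PySem.Set String) (ptrs : List (String × List (String × Int))) : List (String × List (String × Int)) :=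
  ptrs.map (fun p => (p.1, p.2.filter (fun q => !(PySem.Set.contains assigned q.1))))

lemma head_advance (assigned : PySem.Set String) (l : List (String × Int)) :
    (bAdvance assigned l).head? = (l.filter (fun q => !(PySem.Set.contains assigned q.1))).head? := by
  induction l with
  | nil => rfl
  | cons h t ih =>
    obtain ⟨s, c⟩ := h
    by_cases hs : s ∈ assigned
    · simpa [bAdvance, hs] using ih
    · simp [bAdvance, hs]

lemma scan_eq (assigned : PySem.Set String) (ptrs : List (String × List (String × Int)))
    (bestc : Int) (best : Option (String × String)) :
    aFindMax (mapF assigned ptrs) bestc best = (bScan assigned ptrs bestc best).2 ∧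
      (bScan assigned ptrs bestc best).1 = ptrs.map (fun p => (p.1, bAdvance assigned p.2)) := by
  induction ptrs generalizing bestc best with
  | nil => simp [mapF, aFindMax, bScan]
  | cons h t ih =>
    obtain ⟨face, lst⟩ := h
    have hh := head_advance assigned lst
    cases hadv : bAdvance assigned lst with
    | nil =>
      have hf : lst.filter (fun q => !(PySem.Set.contains assigned q.1)) = [] := by
        rw [hadv] at hh
        exact (List.head?_eq_none_iff.mp hh.symm)
      simp only [mapF, List.map_cons, aFindMax, hf, bScan, hadv]
      exact ⟨(ih bestc best).1, by simp [(ih bestc best).2]⟩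
    | cons q rest =>
      obtain ⟨s, c⟩ := q
      obtain ⟨rest', hf⟩ : ∃ rest', lst.filter (fun q => !(PySem.Set.contains assigned q.1)) = (s, c) :: rest' := by
        rw [hadv] at hh
        cases hl : lst.filter (fun q => !(PySem.Set.contains assigned q.1)) with
        | nil => rw [hl] at hh; simp at hh
        | cons a b =>
          rw [hl] at hh
          refine ⟨b, ?_⟩
          simp only [List.head?] at hh
          rw [← Option.some_inj.mp hh]
      simp only [mapF, List.map_cons, aFindMax, hf, bScan, hadv]
      by_cases hc : c > bestc
      · simp only [hc, if_pos]
        exact ⟨(ih c (some (face, s))).1, by simp [(ih c (some (face, s))).2]⟩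
      · simp only [hc, if_false]
        exact ⟨(ih bestc best).1, by simp [(ih bestc best).2]⟩

lemma filter_add_advance (assigned : PySem.Set String) (spk : String) (l : List (String × Int)) :
    (bAdvance assigned l).filter (fun q => !(PySem.Set.contains (PySem.Set.add assigned spk) q.1)) =
      l.filter (fun q => !(PySem.Set.contains (PySem.Set.add assigned spk) q.1)) := by
  induction l with
  | nil => rfl
  | cons h t ih =>
    obtain ⟨s, c⟩ := h
    by_cases hs : s ∈ assigned
    · have hs' : s ∈ PySem.Set.add assigned spk := (PySem.Set.mem_add _ _ _).mpr (Or.inl hs)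
      simpa [bAdvance, hs, hs'] using ih
    · simp [bAdvance, hs]

lemma next_state_eq (assigned : PySem.Set String) (ptrs : List (String × List (String × Int))) (spk face : String) :
    ((mapF assigned ptrs).map (fun p => (p.1, p.2.filter (fun q => q.1 ≠ spk)))).filter (fun p => p.1 ≠ face) =
      mapF (PySem.Set.add assigned spk)
        ((ptrs.map (fun p => (p.1, bAdvance assigned p.2))).filter (fun p => p.1 ≠ face)) := by
  simp only [mapF, List.map_map, List.filter_map]
  congr 1
  funext p
  obtain ⟨f, l⟩ := p
  simp only [Function.comp]
  congr 1
  rw [filter_add_advance assigned spk l, List.filter_filter]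
  congr 1
  funext q
  by_cases hq : q.1 ∈ assigned
  · have hq' : q.1 ∈ PySem.Set.add assigned spk := (PySem.Set.mem_add _ _ _).mpr (Or.inl hq)
    simp [hq, hq']
  · by_cases hspk : q.1 = spk
    · have hq' : q.1 ∈ PySem.Set.add assigned spk := (PySem.Set.mem_add _ _ _).mpr (Or.inr hspk)
      simp [hspk]
    · have hq' : q.1 ∉ PySem.Set.add assigned spk := by
        rw [PySem.Set.mem_add _ _ _]; tauto
      simp [hspk]

lemma loop_eq (fuel : Nat) (assigned : PySem.Set String) (ptrs : List (String × List (String × Int)))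
    (mapping : List (String × String)) :
    aLoop fuel (mapF assigned ptrs) mapping = bLoop fuel assigned ptrs mapping := by
  induction fuel generalizing assigned ptrs mapping with
  | zero => rfl
  | succ n ih =>
    have hemp : (mapF assigned ptrs).isEmpty = ptrs.isEmpty := by
      cases ptrs <;> simp [mapF]
    simp only [aLoop, bLoop, hemp]
    cases hptrs : ptrs.isEmpty with
    | true => simp
    | false =>
      simp only [Bool.false_eq_true, if_false]
      obtain ⟨h1, h2⟩ := scan_eq assigned ptrs (-1) none
      rw [h1, h2]
      cases hb : (bScan assigned ptrs (-1) none).2 with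
      | none => rfl
      | some fs =>
        obtain ⟨face, spk⟩ := fs
        dsimp only
        rw [next_state_eq assigned ptrs spk face]
        exact ih _ _ _

-- ===== VERDICT (by name: the statement is the Claim_ definition above) =====
theorem find_best_speaker_to_face_mapping_py_spec : Claim_equal_find_best_speaker_to_face_mapping_py := by
  intro face_data _
  unfold Spec_find_best_speaker_to_face_mapping_py
  unfold find_best_speaker_to_face_mapping_py find_best_speaker_to_face_mapping_py_alt
  rw [← loop_eq]
  congr 1
  simp [mapF, PySem.Set.empty, PySem.Set.contains]
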